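-- pv_equiv track=rewrite | github.com/lmuffato/choco-orm | choco-orm/Postgres.py | to_postgres_select_field
-- ===== SOURCE A (Python) =====
-- def to_postgres_select_field(fields):
--     new_fileds = []
--     for index, field in enumerate(fields):
--         if index == (len(fields) - 1):
--             new_fileds.append(field)
--         else:
--             new_fileds.extend([field, ','])
--     return new_fileds
-- ===== SOURCE B (Python) =====
-- def to_postgres_select_field(fields):
--     n = len(fields)
--     if n == 0:
--         return []
--     out = [','] * (2 * n - 1)
--     out[0::2] = fields
--     return out
-- ===== Notes on version B (the rewrite author's own statement) =====
-- stated objective: faster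
-- what changed: Preallocates a list of 2n-1 commas and overwrites the even positions with the fields via extended-slice assignment out[0::2] = fields, instead of A's one-pass enumerate loop that branches on index == len-1 to skip the trailing comma.
import Mathlib
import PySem

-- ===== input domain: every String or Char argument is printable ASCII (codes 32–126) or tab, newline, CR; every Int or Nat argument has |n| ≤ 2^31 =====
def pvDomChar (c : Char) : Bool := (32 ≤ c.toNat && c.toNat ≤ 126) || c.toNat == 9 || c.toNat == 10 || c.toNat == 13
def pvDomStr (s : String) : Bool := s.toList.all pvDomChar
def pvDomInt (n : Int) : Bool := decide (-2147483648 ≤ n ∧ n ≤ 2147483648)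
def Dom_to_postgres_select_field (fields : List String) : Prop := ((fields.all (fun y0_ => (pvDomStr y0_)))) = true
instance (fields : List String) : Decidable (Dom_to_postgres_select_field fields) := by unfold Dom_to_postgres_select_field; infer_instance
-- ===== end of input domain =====

-- B preallocates a list of 2n-1 commas and writes the fields into the even positions
-- (Python extended-slice assignment out[0::2] = fields), instead of A's enumerate loop
-- branching on index == len-1 (objective: alternative).


-- ===== PORT A =====
def to_postgres_select_field (fields : List String) : List String :=
  (PySem.List.enumerate fields).foldl
    (fun new_fileds fi =>
      if fi.1 = (fields.length : Int) - 1 then new_fileds ++ [fi.2]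
      else new_fileds ++ [fi.2, ","])
    []

-- ===== PORT B =====
-- out[0::2] = fields (extended-slice assignment; len(fields) even slots) is ported
-- exactly as writing fields[i] to position 2*i for each i, which is its Python semantics.
def to_postgres_select_field_alt (fields : List String) : List String :=
  let n := fields.length
  if n = 0 then []
  else
    (PySem.List.enumerate fields).foldl
      (fun out fi => out.set (2 * fi.1).toNat fi.2)
      (List.replicate (2 * n - 1) ",")

-- ===== PRECONDITION & SPEC =====
def Spec_to_postgres_select_field (fields : List String) (out : List String) : Prop := out = to_postgres_select_field_alt fields
instance (fields : List String) (out : List String) : Decidable (Spec_to_postgres_select_field fields out) := by unfold Spec_to_postgres_select_field; infer_instance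

-- ===== CLAIM (what is proved, stated in full; the proofs are below) =====
def Claim_equal_to_postgres_select_field : Prop := ∀ (fields : List String), Dom_to_postgres_select_field fields → Spec_to_postgres_select_field fields (to_postgres_select_field fields)

-- ===== LEMMAS AND PROOFS =====

theorem foldl_A_append (l : List String) (n : Int) (s : Int)
    (h : s + l.length = n) (acc : List String) :
    (PySem.List.enumerate l s).foldl
      (fun nf fi => if fi.1 = n - 1 then nf ++ [fi.2] else nf ++ [fi.2, ","]) acc
      = acc ++ (l.flatMap (fun field => [field, ","])).dropLast := by
  induction l generalizing s acc with
  | nil => simp [PySem.List.enumerate_nil]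
  | cons x xs ih =>
    rw [PySem.List.enumerate_cons]
    cases xs with
    | nil =>
      have hs : s = n - 1 := by simp at h; omega
      simp [PySem.List.enumerate_nil, hs]
    | cons y ys =>
      have hs : ¬ (s = n - 1) := by simp at h; omega
      have hrec := ih (s := s + 1) (by simp at h ⊢; omega) (acc ++ [x, ","])
      simp only [List.foldl_cons, hs, if_false]
      rw [hrec]
      simp [List.flatMap_cons, List.append_assoc]

theorem foldl_B_set (l : List String) (s : Nat) (pre : List String)
    (hpre : pre.length = 2 * s) :
    (PySem.List.enumerate l (s : Int)).foldl
      (fun out fi => out.set (2 * fi.1).toNat fi.2)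
      (pre ++ List.replicate (2 * l.length - 1) ",")
      = pre ++ (l.flatMap (fun field => [field, ","])).dropLast := by
  induction l generalizing s pre with
  | nil => simp [PySem.List.enumerate_nil]
  | cons x xs ih =>
    rw [PySem.List.enumerate_cons]
    have hrep : List.replicate (2 * (x :: xs).length - 1) ","
        = ("," : String) :: List.replicate (2 * xs.length) "," := by
      simp [List.length_cons]; rw [show 2 * (xs.length + 1) - 1 = 2 * xs.length + 1 by omega]
      simp [List.replicate_succ]
    have hset : ((pre ++ List.replicate (2 * (x :: xs).length - 1) ",").set
        (2 * (s : Int)).toNat x)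
        = pre ++ x :: List.replicate (2 * xs.length) "," := by
      rw [hrep]
      have : (2 * (s : Int)).toNat = pre.length := by omega
      rw [this, List.set_append_right _ _ (le_refl _)]
      simp
    cases xs with
    | nil =>
      simp [PySem.List.enumerate_nil, List.foldl_cons] at hset ⊢
      rw [hset]
    | cons y ys =>
      simp only [List.foldl_cons]
      rw [hset]
      have hrep2 : (x :: List.replicate (2 * (y :: ys).length) ",")
          = [x, ","] ++ List.replicate (2 * (y :: ys).length - 1) "," := by
        simp [List.length_cons]
        rw [show 2 * (ys.length + 1) = 2 * (ys.length + 1) - 1 + 1 by omega]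
        simp [List.replicate_succ]
      have hcast : ((s : Int) + 1) = ((s + 1 : Nat) : Int) := by push_cast; ring
      rw [hrep2, ← List.append_assoc, hcast,
        ih (s := s + 1) (pre := pre ++ [x, ","]) (by simp [hpre]; omega)]
      simp [List.flatMap_cons, List.append_assoc]

-- ===== VERDICT (by name: the statement is the Claim_ definition above) =====
theorem to_postgres_select_field_spec : Claim_equal_to_postgres_select_field := by
  intro fields _
  unfold Spec_to_postgres_select_field to_postgres_select_field to_postgres_select_field_alt
  cases fields with
  | nil => simp [PySem.List.enumerate_nil]
  | cons x xs =>
    have hA := foldl_A_append (x :: xs) (((xs.length + 1 : Nat) : Int)) 0 (by simp) []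
    have hB := foldl_B_set (x :: xs) 0 [] (by simp)
    simp only [List.length_cons] at hA hB ⊢
    rw [if_neg (by omega : ¬ (xs.length + 1 = 0))]
    exact hA.trans (by simpa using hB.symm)
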